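-- pv_equiv track=rewrite | github.com/lndat18/Design-and-Analysis-of-Algorithms | final/Tri_52200171_Trinh_52200005_Dat_52200160/source/Problem.py | extract_selected_coins
-- ===== SOURCE A (Python) =====
-- def extract_selected_coins(C):
--     n = len(C)
--     if n == 0:
--         return []
--
--     F = [0 for i in range(n + 1)]
--     F[0] = 0
--     F[1] = C[0]
--     for i in range(2, n + 1):
--         F[i] = max(C[i - 1] + F[i - 2], F[i - 1])
--     selected = []
--     i = n
--     while i > 0:
--         if F[i] == F[i - 1]:
--             i -= 1
--         else:
--             selected.append(C[i - 1])
--             i -= 2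
--     return selected[::-1]
-- ===== SOURCE B (Python) =====
-- def extract_selected_coins(C):
--     if not C:
--         return []
--     # forward one-pass: (sum, selection chain) for best over the previous / current prefix;
--     # chains are shared parent-pointer cells (parent, coin), unwound once at the end
--     prev = (0, None)
--     cur = (C[0], (None, C[0]) if C[0] != 0 else None)
--     for c in C[1:]:
--         if prev[0] + c > cur[0]:
--             prev, cur = cur, (prev[0] + c, (prev[1], c))
--         else:
--             prev = cur
--     out = []
--     node = cur[1]
--     while node is not None:
--         out.append(node[1])
--         node = node[0]
--     return out[::-1]
-- ===== Notes on version B (the rewrite author's own statement) =====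
-- stated objective: faster
-- what changed: Replaces A's DP table + backward backtrack + reverse with a single forward pass that carries (sum, selection-chain) pairs for the previous and current prefix (shared parent-pointer cells, ties kept toward not taking the coin), unwound once at the end; no table, no backtrack.
import Mathlib
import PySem

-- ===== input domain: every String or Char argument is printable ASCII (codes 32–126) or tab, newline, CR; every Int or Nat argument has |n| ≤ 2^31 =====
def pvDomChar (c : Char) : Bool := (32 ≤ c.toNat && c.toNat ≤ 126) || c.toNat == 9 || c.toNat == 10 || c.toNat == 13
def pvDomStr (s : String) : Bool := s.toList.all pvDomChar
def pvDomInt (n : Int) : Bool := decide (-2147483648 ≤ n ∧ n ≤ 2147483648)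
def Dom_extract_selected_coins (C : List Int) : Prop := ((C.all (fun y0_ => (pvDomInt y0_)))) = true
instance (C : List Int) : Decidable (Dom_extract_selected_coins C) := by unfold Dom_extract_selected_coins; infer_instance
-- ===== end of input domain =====

-- B replaces A's DP table + backward backtrack + reverse by a single forward pass carrying
-- (sum, selection) pairs for the previous/current prefix; same return value, no table, no backtrack.

-- ===== PORT A =====
-- F[0]=0, F[1]=C[0] written into the fresh [0]*(n+1) table
def initF (C : List Int) : List Int :=
  ((List.replicate (C.length + 1) (0 : Int)).set 0 0).set 1 (PySem.List.pyGetD C 0 0)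

-- loop body: F[i] = max(C[i-1] + F[i-2], F[i-1])
def stepA (C : List Int) (F : List Int) (i : Int) : List Int :=
  F.set i.toNat (max (PySem.List.pyGetD C (i - 1) 0 + PySem.List.pyGetD F (i - 2) 0)
                     (PySem.List.pyGetD F (i - 1) 0))

def buildF (C : List Int) : List Int :=
  (PySem.List.pyRange 2 ((C.length : Int) + 1) 1).foldl (stepA C) (initF C)

-- the while-loop: i > 0; skip on F[i]==F[i-1], else append C[i-1] and jump two back
def backA (C F : List Int) (i : Nat) (selected : List Int) : List Int :=
  if i = 0 then selected
  else if PySem.List.pyGetD F (i : Int) 0 = PySem.List.pyGetD F ((i : Int) - 1) 0 then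
    backA C F (i - 1) selected
  else
    backA C F (i - 2) (selected ++ [PySem.List.pyGetD C ((i : Int) - 1) 0])
  termination_by i
  decreasing_by all_goals omega

def extract_selected_coins (C : List Int) : List Int :=
  if C.length = 0 then []
  else (PySem.List.slice? (backA C (buildF C) C.length []) none none (-1)).getD []

-- ===== PORT B =====
-- one forward step: prev, cur = cur, (better of extending prev's chain with c, or cur; ties keep cur);
-- a parent-pointer cell (parent, c) is exactly a cons cell c :: parent, None is []
def bstep (st : (Int × List Int) × (Int × List Int)) (c : Int) : (Int × List Int) × (Int × List Int) :=
  if st.1.1 + c > st.2.1 then (st.2, (st.1.1 + c, c :: st.1.2)) else (st.2, st.2)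

-- the unwinding while-loop: append each chain cell's coin to out
def unwind (node : List Int) (out : List Int) : List Int :=
  match node with
  | [] => out
  | c :: p => unwind p (out ++ [c])

def extract_selected_coins_alt (C : List Int) : List Int :=
  match C with
  | [] => []
  | c0 :: rest =>
    let cur := (rest.foldl bstep ((0, []), (c0, if c0 ≠ 0 then [c0] else []))).2
    (PySem.List.slice? (unwind cur.2 []) none none (-1)).getD []

-- ===== PRECONDITION & SPEC =====
def Spec_extract_selected_coins (C : List Int) (out : List Int) : Prop := out = extract_selected_coins_alt C
instance (C : List Int) (out : List Int) : Decidable (Spec_extract_selected_coins C out) := by unfold Spec_extract_selected_coins; infer_instance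

-- ===== CLAIM (what is proved, stated in full; the proofs are below) =====
def Claim_equal_extract_selected_coins : Prop := ∀ (C : List Int), Dom_extract_selected_coins C → Spec_extract_selected_coins C (extract_selected_coins C)

-- ===== LEMMAS AND PROOFS =====

-- the DP value F[i] as a function of the input
def G (C : List Int) : Nat → Int
  | 0 => 0
  | 1 => C.getD 0 0
  | (i + 2) => max (C.getD (i + 1) 0 + G C i) (G C (i + 1))

-- the selection A's backtrack produces from index i, in forward order
def T (C : List Int) : Nat → List Int
  | 0 => []
  | 1 => if G C 1 = G C 0 then [] else [C.getD 0 0]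
  | (i + 2) => if G C (i + 2) = G C (i + 1) then T C (i + 1) else T C i ++ [C.getD (i + 1) 0]

theorem length_stepA (C F : List Int) (i : Int) : (stepA C F i).length = F.length := by
  simp [stepA]

theorem length_foldl_stepA (C : List Int) (l : List Int) (F : List Int) :
    (l.foldl (stepA C) F).length = F.length := by
  induction l generalizing F with
  | nil => rfl
  | cons a l ih => simp [List.foldl, ih, length_stepA]

theorem length_initF (C : List Int) : (initF C).length = C.length + 1 := by
  simp [initF]

theorem pyRange_two_succ (m : Nat) (h : 1 ≤ m) :
    PySem.List.pyRange 2 ((m : Int) + 1 + 1) 1 = PySem.List.pyRange 2 ((m : Int) + 1) 1 ++ [(m : Int) + 1] := by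
  have h1 : (((m : Int) + 1 + 1) - 2).toNat = (m - 1) + 1 := by omega
  have h2 : (((m : Int) + 1) - 2).toNat = m - 1 := by omega
  rw [PySem.List.pyRange_one, PySem.List.pyRange_one, h1, h2, List.range_succ, List.map_append]
  congr 1
  simp
  omega

theorem ftable (C : List Int) (m : Nat) (hm : 1 ≤ m) (hmn : m ≤ C.length) :
    ∀ j, j ≤ m →
      PySem.List.pyGetD ((PySem.List.pyRange 2 ((m : Int) + 1) 1).foldl (stepA C) (initF C)) (j : Int) 0 = G C j := by
  induction m with
  | zero => omega
  | succ k ih =>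
    intro j hj
    rcases Nat.eq_zero_or_pos k with hk | hk
    · subst hk
      have hrange : PySem.List.pyRange 2 ((1 : Nat) + 1 : Int) 1 = [] := by
        rw [PySem.List.pyRange_one]; norm_num
      rw [hrange]
      simp only [List.foldl_nil]
      rw [PySem.List.pyGetD_natCast]
      have hlen : 1 ≤ C.length := by omega
      interval_cases j
      · simp [initF, G, List.getD_eq_getElem?_getD]
      · have h2 : 1 < C.length + 1 := by omega
        simp [initF, G, List.getD_eq_getElem?_getD, h2, PySem.List.pyGetD_zero]
    · -- k ≥ 1 : one more loop iteration, writing index k+1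
      obtain ⟨k', rfl⟩ : ∃ k', k = k' + 1 := ⟨k - 1, by omega⟩
      have hcast : ((k' + 1 + 1 : Nat) : Int) + 1 = ((k' + 1 : Nat) : Int) + 1 + 1 := by push_cast; ring
      rw [hcast, pyRange_two_succ (k' + 1) (by omega), List.foldl_append]
      set Fm := (PySem.List.pyRange 2 (((k' + 1 : Nat) : Int) + 1) 1).foldl (stepA C) (initF C) with hFm
      have hFmlen : Fm.length = C.length + 1 := by
        rw [hFm, length_foldl_stepA, length_initF]
      have ihk : ∀ j, j ≤ k' + 1 → Fm.getD j 0 = G C j := by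
        intro j hj
        rw [← PySem.List.pyGetD_natCast]
        exact ih (by omega) (by omega) j hj
      simp only [List.foldl_cons, List.foldl_nil]
      have e1 : ((k' + 1 : Nat) : Int) + 1 - 1 = ((k' + 1 : Nat) : Int) := by ring
      have e2 : ((k' + 1 : Nat) : Int) + 1 - 2 = ((k' : Nat) : Int) := by push_cast; ring
      have hv : stepA C Fm (((k' + 1 : Nat) : Int) + 1)
          = Fm.set (k' + 2) (max (C.getD (k' + 1) 0 + G C k') (G C (k' + 1))) := by
        rw [stepA, e1, e2, PySem.List.pyGetD_natCast, PySem.List.pyGetD_natCast,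
          PySem.List.pyGetD_natCast, ihk k' (by omega), ihk (k' + 1) (by omega)]
        congr 1
      rw [hv]
      rcases Nat.lt_or_ge j (k' + 2) with hj2 | hj2
      · rw [PySem.List.pyGetD_natCast, List.getD_eq_getElem?_getD, List.getElem?_set,
          if_neg (show ¬ (k' + 2 = j) by omega), ← List.getD_eq_getElem?_getD, ihk j (by omega)]
      · have hj3 : j = k' + 2 := by omega
        subst hj3
        have hlt : k' + 2 < Fm.length := by omega
        rw [PySem.List.pyGetD_natCast, List.getD_eq_getElem?_getD, List.getElem?_set,
          if_pos rfl, if_pos hlt, Option.getD_some, G]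

theorem back_eq (C F : List Int) (n : Nat)
    (Hg : ∀ j, j ≤ n → PySem.List.pyGetD F (j : Int) 0 = G C j) :
    ∀ i, i ≤ n → ∀ sel, backA C F i sel = sel ++ (T C i).reverse := by
  intro i
  induction i using Nat.strong_induction_on with
  | _ i ih =>
    intro hin sel
    rw [backA]
    rcases Nat.eq_zero_or_pos i with h0 | h0
    · subst h0; simp [T]
    · have e1 : ((i : Nat) : Int) - 1 = ((i - 1 : Nat) : Int) := by omega
      rw [if_neg (by omega), e1, Hg i hin, Hg (i - 1) (by omega)]
      rcases Nat.lt_or_ge i 2 with h2 | h2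
      · have : i = 1 := by omega
        subst this
        by_cases hc : G C 1 = G C 0
        · rw [if_pos hc]
          rw [backA]
          simp [T, hc]
        · rw [if_neg hc]
          rw [backA]
          simp [T, hc, PySem.List.pyGetD_zero]
      · obtain ⟨k, rfl⟩ : ∃ k, i = k + 2 := ⟨i - 2, by omega⟩
        simp only [show k + 2 - 1 = k + 1 from rfl, show k + 2 - 2 = k from rfl]
        by_cases hc : G C (k + 2) = G C (k + 1)
        · rw [if_pos hc, ih (k + 1) (by omega) (by omega) sel]
          simp [T, hc]
        · rw [if_neg hc, PySem.List.pyGetD_natCast, ih k (by omega) (by omega)]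
          simp [T, hc, List.reverse_append]

theorem unwind_eq (node : List Int) : ∀ out, unwind node out = out ++ node := by
  induction node with
  | nil => simp [unwind]
  | cons c p ih => intro out; rw [unwind, ih]; simp

theorem foldB (C : List Int) : ∀ (l : List Int) (k : Nat),
    k + 1 + l.length = C.length → C.drop (k + 1) = l →
    ((l.foldl bstep ((G C k, (T C k).reverse), (G C (k + 1), (T C (k + 1)).reverse)))).2.2
      = (T C C.length).reverse := by
  intro l
  induction l with
  | nil =>
    intro k hlen _
    simp only [List.foldl_nil]
    have : C.length = k + 1 := by simpa using hlen.symm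
    rw [this]
  | cons c l' ih =>
    intro k hlen hdrop
    have hk2 : k + 2 ≤ C.length := by simp at hlen; omega
    have hc : C.getD (k + 1) 0 = c := by
      have h0 : C[k + 1]? = some c := by
        have : (C.drop (k + 1))[0]? = C[k + 1 + 0]? := List.getElem?_drop
        rw [hdrop] at this
        simpa using this.symm
      simp [List.getD_eq_getElem?_getD, h0]
    have hstep : bstep ((G C k, (T C k).reverse), (G C (k + 1), (T C (k + 1)).reverse)) c
        = ((G C (k + 1), (T C (k + 1)).reverse), (G C (k + 2), (T C (k + 2)).reverse)) := by
      rw [bstep]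
      by_cases hgt : G C k + c > G C (k + 1)
      · rw [if_pos hgt]
        have hG : G C (k + 2) = G C k + c := by
          rw [G, hc]; omega
        have hT : (T C (k + 2)).reverse = c :: (T C k).reverse := by
          rw [T, if_neg (by omega), hc]
          simp
        rw [hG, hT]
      · rw [if_neg hgt]
        have hG : G C (k + 2) = G C (k + 1) := by
          rw [G, hc]; omega
        have hT : T C (k + 2) = T C (k + 1) := by
          rw [T, if_pos hG]
        rw [hG, hT]
    rw [List.foldl_cons, hstep]
    apply ih (k + 1)
    · simp at hlen ⊢; omega
    · have : C.drop (k + 1 + 1) = (C.drop (k + 1)).drop 1 := by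
        rw [List.drop_drop]
      rw [this, hdrop]
      rfl

-- ===== VERDICT (by name: the statement is the Claim_ definition above) =====
theorem extract_selected_coins_spec : Claim_equal_extract_selected_coins := by
  intro C _
  unfold Spec_extract_selected_coins
  cases C with
  | nil => rfl
  | cons c0 rest =>
    set C := c0 :: rest with hC
    have hlen : C.length = rest.length + 1 := by simp [hC]
    have hn1 : 1 ≤ C.length := by omega
    -- A's side
    have Hg : ∀ j, j ≤ C.length → PySem.List.pyGetD (buildF C) (j : Int) 0 = G C j := by
      intro j hj
      exact ftable C C.length hn1 le_rfl j hj
    have hA : extract_selected_coins C = T C C.length := by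
      rw [extract_selected_coins, if_neg (by omega),
        back_eq C (buildF C) C.length Hg C.length le_rfl [],
        PySem.List.slice?_none_none_neg_one]
      simp
    -- B's side
    have hG1 : G C 1 = c0 := by simp [G, hC, List.getD]
    have hT1 : T C 1 = if c0 ≠ 0 then [c0] else [] := by
      rw [T, hG1]
      show (if c0 = G C 0 then _ else [C.getD 0 0]) = _
      simp [G, hC, List.getD]
    have hB : extract_selected_coins_alt C = T C C.length := by
      conv_lhs => rw [hC]
      show (PySem.List.slice?
          (unwind ((rest.foldl bstep ((0, []), (c0, if c0 ≠ 0 then [c0] else []))).2).2 []) none none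
          (-1)).getD [] = T C C.length
      have hinit : ((0 : Int), ([] : List Int)) = (G C 0, (T C 0).reverse) := by simp [G, T]
      have hcur : (c0, if c0 ≠ 0 then [c0] else []) = (G C 1, (T C 1).reverse) := by
        rw [hG1, hT1]
        by_cases h : c0 = 0 <;> simp [h]
      rw [hinit, hcur, foldB C rest 0 (by omega) (by simp [hC]), unwind_eq,
        PySem.List.slice?_none_none_neg_one]
      simp
    rw [hA, hB]
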